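-- pv_equiv track=rewrite | github.com/Shajidur-Rahman/Codeforces-Solutions | 1722C.py | solve
-- ===== SOURCE A (Python) =====
-- def solve(u,v,w):
-- 	ans = 0
-- 	for word in u:
-- 		if word in v and word in w:
-- 			continue
-- 		elif word in v or word in w:
-- 			ans += 1
-- 		else:
-- 			ans += 3
-- 	return ans
-- ===== SOURCE B (Python) =====
-- def solve(u, v, w):
--     cnt = {}
--     for word in u:
--         cnt[word] = cnt.get(word, 0) + 1
--     vs = set(v)
--     ws = set(w)
--     us = set(cnt)
--     one = us & (vs ^ ws)        # distinct words of u lying in exactly one of v, w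
--     neither = us - (vs | ws)    # distinct words of u lying in neither
--     return sum(cnt[x] for x in one) + 3 * sum(cnt[x] for x in neither)
-- ===== Notes on version B (the rewrite author's own statement) =====
-- stated objective: faster
-- what changed: Instead of scoring each word of u by branching on list membership, B builds a frequency dict of u, partitions the distinct words by set algebra (us & (vs ^ ws) and us - (vs | ws)) and returns the multiplicity-weighted sums 1*|one| + 3*|neither|.
import Mathlib
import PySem

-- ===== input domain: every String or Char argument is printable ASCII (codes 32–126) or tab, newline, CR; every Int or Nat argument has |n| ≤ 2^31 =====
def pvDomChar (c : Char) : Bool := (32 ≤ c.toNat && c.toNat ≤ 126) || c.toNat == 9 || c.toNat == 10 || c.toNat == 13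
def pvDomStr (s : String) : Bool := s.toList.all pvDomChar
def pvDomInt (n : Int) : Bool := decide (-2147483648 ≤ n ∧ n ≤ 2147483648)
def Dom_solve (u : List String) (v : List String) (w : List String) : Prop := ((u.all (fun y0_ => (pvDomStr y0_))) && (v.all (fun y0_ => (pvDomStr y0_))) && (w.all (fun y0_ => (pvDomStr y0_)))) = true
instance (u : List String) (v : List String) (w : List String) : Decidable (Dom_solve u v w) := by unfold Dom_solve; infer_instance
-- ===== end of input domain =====

-- B replaces A's per-word 0/1/3 scoring loop by a frequency dict of u plus a set-algebra
-- partition of the distinct words, returning multiplicity-weighted sums (faster: hashed sets/dict).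

-- ===== PORT A =====
def solve (u : List String) (v : List String) (w : List String) : Int :=
  u.foldl (fun ans word =>
    if word ∈ v ∧ word ∈ w then ans
    else if word ∈ v ∨ word ∈ w then ans + 1
    else ans + 3) 0

-- ===== PORT B =====
def solve_alt (u : List String) (v : List String) (w : List String) : Int :=
  let cnt := u.foldl (fun d word => d.insert word (d.getD word 0 + 1)) PySem.Dict.empty
  let vs := PySem.Set.ofList v
  let ws := PySem.Set.ofList w
  let us := PySem.Set.ofList cnt.keys
  let one := PySem.Set.inter us (PySem.Set.symmDiff vs ws)
  let neither := PySem.Set.diff us (PySem.Set.union vs ws)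
  -- cnt[x]: every summed x is a key of cnt, so Python's lookup never raises; getD is exact here
  (one.map (fun x => cnt.getD x 0)).sum + 3 * (neither.map (fun x => cnt.getD x 0)).sum

-- ===== PRECONDITION & SPEC =====
def Spec_solve (u : List String) (v : List String) (w : List String) (out : Int) : Prop := out = solve_alt u v w
instance (u : List String) (v : List String) (w : List String) (out : Int) : Decidable (Spec_solve u v w out) := by unfold Spec_solve; infer_instance

-- ===== CLAIM (what is proved, stated in full; the proofs are below) =====
def Claim_equal_solve : Prop := ∀ (u : List String) (v : List String) (w : List String), Dom_solve u v w → Spec_solve u v w (solve u v w)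

-- ===== LEMMAS AND PROOFS =====

-- the per-word score A adds
def pvScore (v w : List String) (x : String) : Int :=
  if x ∈ v ∧ x ∈ w then 0 else if x ∈ v ∨ x ∈ w then 1 else 3

theorem solve_eq_sum (u v w : List String) : solve u v w = (u.map (pvScore v w)).sum := by
  unfold solve
  have h : (fun (ans : Int) (word : String) =>
      if word ∈ v ∧ word ∈ w then ans
      else if word ∈ v ∨ word ∈ w then ans + 1
      else ans + 3) = fun ans word => ans + pvScore v w word := by
    funext a x; unfold pvScore; split_ifs <;> simp
  rw [h, PySem.List.foldl_add]
  simp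

theorem solve_alt_eq (u v w : List String) :
    solve_alt u v w =
      (∑ x ∈ (u.toFinset.filter (fun x => (x ∈ v ∨ x ∈ w) ∧ ¬(x ∈ v ∧ x ∈ w))), (u.count x : Int))
      + 3 * (∑ x ∈ (u.toFinset.filter (fun x => ¬(x ∈ v ∨ x ∈ w))), (u.count x : Int)) := by
  unfold solve_alt
  simp only
  rw [PySem.Dict.foldl_insert_getD_add_one_eq_counter]
  rw [PySem.Dict.keys_counter, PySem.Set.ofList_ofList]
  congr 1
  · rw [← List.sum_toFinset _ (PySem.Set.nodup_inter _ _ (PySem.Set.nodup_ofList u))]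
    have he : (PySem.Set.inter (PySem.Set.ofList u) (PySem.Set.symmDiff (PySem.Set.ofList v) (PySem.Set.ofList w))).toFinset
        = u.toFinset.filter (fun x => (x ∈ v ∨ x ∈ w) ∧ ¬(x ∈ v ∧ x ∈ w)) := by
      ext x
      simp only [List.mem_toFinset, Finset.mem_filter, PySem.Set.mem_inter,
        PySem.Set.mem_symmDiff, PySem.Set.mem_ofList]
      tauto
    rw [he]
    exact Finset.sum_congr rfl (fun x _ => PySem.Dict.getD_counter u x)
  · rw [← List.sum_toFinset _ (PySem.Set.nodup_diff _ _ (PySem.Set.nodup_ofList u))]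
    have he : (PySem.Set.diff (PySem.Set.ofList u) (PySem.Set.union (PySem.Set.ofList v) (PySem.Set.ofList w))).toFinset
        = u.toFinset.filter (fun x => ¬(x ∈ v ∨ x ∈ w)) := by
      ext x
      simp only [List.mem_toFinset, Finset.mem_filter, PySem.Set.mem_diff,
        PySem.Set.mem_union, PySem.Set.mem_ofList]
    rw [he]
    exact congrArg _ (Finset.sum_congr rfl (fun x _ => PySem.Dict.getD_counter u x))

theorem sum_score_eq (u v w : List String) :
    (u.map (pvScore v w)).sum =
      (∑ x ∈ (u.toFinset.filter (fun x => (x ∈ v ∨ x ∈ w) ∧ ¬(x ∈ v ∧ x ∈ w))), (u.count x : Int))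
      + 3 * (∑ x ∈ (u.toFinset.filter (fun x => ¬(x ∈ v ∨ x ∈ w))), (u.count x : Int)) := by
  rw [Finset.sum_list_map_count]
  rw [← Finset.sum_filter_add_sum_filter_not u.toFinset (fun x => x ∈ v ∨ x ∈ w)]
  congr 1
  · rw [← Finset.sum_filter_add_sum_filter_not (u.toFinset.filter (fun x => x ∈ v ∨ x ∈ w)) (fun x => x ∈ v ∧ x ∈ w)]
    rw [Finset.filter_filter, Finset.filter_filter]
    have h0 : ∑ x ∈ u.toFinset.filter (fun x => (x ∈ v ∨ x ∈ w) ∧ (x ∈ v ∧ x ∈ w)), u.count x • pvScore v w x = 0 := by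
      apply Finset.sum_eq_zero; intro x hx
      simp only [Finset.mem_filter] at hx
      simp [pvScore, hx.2.2]
    rw [h0, zero_add]
    apply Finset.sum_congr rfl
    intro x hx
    simp only [Finset.mem_filter] at hx
    simp [pvScore, hx.2.1, hx.2.2]
  · rw [Finset.mul_sum]
    apply Finset.sum_congr rfl
    intro x hx
    simp only [Finset.mem_filter, not_or] at hx
    simp [pvScore, hx.2.1, hx.2.2]
    ring

-- ===== VERDICT (by name: the statement is the Claim_ definition above) =====
theorem solve_spec : Claim_equal_solve := by
  intro u v w _
  unfold Spec_solve
  rw [solve_alt_eq, solve_eq_sum, sum_score_eq]
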